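-- pv_equiv track=rewrite | github.com/cutehammond772/problem-solving-archive | 백준/Gold/2295. 세 수의 합/세 수의 합.py | solve
-- ===== SOURCE A (Python) =====
-- from collections import defaultdict
--
-- def solve(N, U):
--   U.sort()
--
--   # a + b = d - c로 나누어서 푼다.
--   # d - c의 경우, d의 최대를 찾아야 하므로 dict로 둔다.
--   adds, subs = set(), defaultdict(int)
--
--   for i in range(N):
--     for j in range(i, N):
--       # 두 수의 합
--       adds.add(U[i] + U[j])
--
--       # 두 수의 차
--       subs[U[j] - U[i]] = max(subs[U[j] - U[i]], U[j])
--
--   result = 0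
--
--   for num in adds:
--     if num in subs:
--       result = max(result, subs[num])
--
--   return result
-- ===== SOURCE B (Python) =====
-- def solve(N, U):
--     U.sort()
--     adds = {U[i] + U[j] for i in range(N) for j in range(i, N)}
--     best = 0
--     for j in range(N):
--         if U[j] > best and any(U[j] - U[i] in adds for i in range(j + 1)):
--             best = U[j]
--     return best
-- ===== Notes on version B (the rewrite author's own statement) =====
-- stated objective: simpler
-- what changed: B removes A's difference-keyed defaultdict and its final scan over the sum set: it builds only the pairwise-sum set and then, scanning elements directly, takes the largest U[j] for which some U[i] (i <= j) has U[j]-U[i] among the pairwise sums.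
import Mathlib
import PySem

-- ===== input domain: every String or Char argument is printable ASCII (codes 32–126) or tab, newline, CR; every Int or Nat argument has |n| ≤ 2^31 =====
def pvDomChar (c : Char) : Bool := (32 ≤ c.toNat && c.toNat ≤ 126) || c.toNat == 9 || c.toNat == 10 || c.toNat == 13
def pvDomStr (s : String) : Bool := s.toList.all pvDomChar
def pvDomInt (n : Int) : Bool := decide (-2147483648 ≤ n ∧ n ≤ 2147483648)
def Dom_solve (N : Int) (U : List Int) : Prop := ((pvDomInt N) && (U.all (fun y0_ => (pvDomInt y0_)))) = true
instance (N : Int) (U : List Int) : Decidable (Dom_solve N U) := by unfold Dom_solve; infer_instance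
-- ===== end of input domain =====

-- B drops A's difference-keyed defaultdict entirely: it builds only the pairwise-sum set and searches
-- index pairs directly for the best element (objective: simpler, same O(N^2)). Both A and B sort U in
-- place identically; the equivalence proved is about the return value.

-- ===== PORT A =====
def solve (N : Int) (U : List Int) : Int :=
  let xs := PySem.List.sorted U (fun x => x) false
  let st := (PySem.List.pyRange 0 N).foldl (fun st i =>
      (PySem.List.pyRange i N).foldl
        (fun (st : PySem.Set Int × PySem.Dict Int Int) j =>
          (PySem.Set.add st.1 (PySem.List.pyGetD xs i 0 + PySem.List.pyGetD xs j 0),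
           PySem.Dict.modify st.2 (PySem.List.pyGetD xs j 0 - PySem.List.pyGetD xs i 0) 0
             (fun old => max old (PySem.List.pyGetD xs j 0)))) st)
    (PySem.Set.empty, PySem.Dict.empty)
  -- the final Python loop iterates the set; the running max is iteration-order independent
  List.foldl (fun result num =>
      if PySem.Dict.contains st.2 num then max result (PySem.Dict.getD st.2 num 0) else result) 0 st.1

-- ===== PORT B =====
def solve_alt (N : Int) (U : List Int) : Int :=
  let xs := PySem.List.sorted U (fun x => x) false
  let adds := (PySem.List.pyRange 0 N).foldl (fun s i =>
      (PySem.List.pyRange i N).foldl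
        (fun (s : PySem.Set Int) j =>
          PySem.Set.add s (PySem.List.pyGetD xs i 0 + PySem.List.pyGetD xs j 0)) s)
    PySem.Set.empty
  (PySem.List.pyRange 0 N).foldl (fun best j =>
      if best < PySem.List.pyGetD xs j 0 ∧
         (PySem.List.pyRange 0 (j + 1)).any (fun i =>
           PySem.Set.contains adds (PySem.List.pyGetD xs j 0 - PySem.List.pyGetD xs i 0))
      then PySem.List.pyGetD xs j 0 else best) 0

-- ===== PRECONDITION & SPEC =====
-- Pre_ excludes exactly the inputs where A raises IndexError: N larger than len(U).
def Pre_solve (N : Int) (U : List Int) : Prop := N ≤ (U.length : Int)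
instance (N : Int) (U : List Int) : Decidable (Pre_solve N U) := by unfold Pre_solve; infer_instance
def pvWitness_solve : Int × List Int := (3, [1, 2, 3])

def Spec_solve (N : Int) (U : List Int) (out : Int) : Prop := out = solve_alt N U
instance (N : Int) (U : List Int) (out : Int) : Decidable (Spec_solve N U out) := by unfold Spec_solve; infer_instance

-- ===== CLAIM (what is proved, stated in full; the proofs are below) =====
def Claim_equal_solve : Prop := ∀ (N : Int) (U : List Int), Dom_solve N U → Pre_solve N U → Spec_solve N U (solve N U)

-- ===== LEMMAS AND PROOFS =====

-- the index pairs (i, j), 0 ≤ i ≤ j < N, in the order both nested loops visit them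
def pvPairs (N : Int) : List (Int × Int) :=
  (PySem.List.pyRange 0 N).flatMap (fun i => (PySem.List.pyRange i N).map (fun j => (i, j)))

def pvV (xs : List Int) (k : Int) : Int := PySem.List.pyGetD xs k 0
def pvSum (xs : List Int) (p : Int × Int) : Int := pvV xs p.1 + pvV xs p.2
def pvDif (xs : List Int) (p : Int × Int) : Int := pvV xs p.2 - pvV xs p.1

-- A's adds set / subs dict and B's adds set, as folds over the flat pair list
def pvAdds (xs : List Int) (N : Int) : PySem.Set Int :=
  (pvPairs N).foldl (fun s p => PySem.Set.add s (pvSum xs p)) PySem.Set.empty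
def pvSubs (xs : List Int) (N : Int) : PySem.Dict Int Int :=
  (pvPairs N).foldl (fun d p => PySem.Dict.modify d (pvDif xs p) 0 (fun old => max old (pvV xs p.2)))
    PySem.Dict.empty

lemma pvPairs_mem (N i j : Int) : (i, j) ∈ pvPairs N ↔ 0 ≤ i ∧ i ≤ j ∧ j < N := by
  simp only [pvPairs, List.mem_flatMap, List.mem_map, PySem.List.mem_pyRange_one, Prod.mk.injEq]
  constructor
  · rintro ⟨a, ha, b, hb, rfl, rfl⟩; omega
  · rintro ⟨h0, h1, h2⟩; exact ⟨i, ⟨h0, by omega⟩, j, ⟨h1, h2⟩, rfl, rfl⟩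

-- generic running-max-with-a-test loop bounds
lemma pvFold_ge_init {α : Type} (p : α → Prop) [DecidablePred p] (g : α → Int) (l : List α) (a : Int) :
    a ≤ l.foldl (fun acc x => if p x then max acc (g x) else acc) a := by
  induction l generalizing a with
  | nil => simp
  | cons x t ih =>
    refine le_trans ?_ (ih _)
    by_cases h : p x <;> simp [h]

lemma pvFold_ge_elem {α : Type} (p : α → Prop) [DecidablePred p] (g : α → Int) (l : List α)
    {x : α} : ∀ a : Int, x ∈ l → p x →
    g x ≤ l.foldl (fun acc x => if p x then max acc (g x) else acc) a := by
  induction l with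
  | nil => intro a h; cases h
  | cons y t ih =>
    intro a hx hp
    simp only [List.foldl_cons]
    rcases List.mem_cons.mp hx with rfl | hmem
    · have h1 : g x ≤ (if p x then max a (g x) else a) := by simp [hp]
      exact le_trans h1 (pvFold_ge_init p g t _)
    · exact ih _ hmem hp

lemma pvFold_le {α : Type} (p : α → Prop) [DecidablePred p] (g : α → Int) (l : List α)
    (b : Int) : ∀ a : Int, a ≤ b → (∀ x ∈ l, p x → g x ≤ b) →
    l.foldl (fun acc x => if p x then max acc (g x) else acc) a ≤ b := by
  induction l with
  | nil => intro a h0 _; simpa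
  | cons x t ih =>
    intro a h0 h
    simp only [List.foldl_cons]
    refine ih _ ?_ (fun y hy hpy => h y (List.mem_cons_of_mem _ hy) hpy)
    by_cases hx : p x
    · simp only [if_pos hx]; exact max_le h0 (h x List.mem_cons_self hx)
    · simpa [hx]

-- nested index loops are one loop over the flat pair list
lemma pvNest {σ : Type} (g : σ → Int → Int → σ) (N : Int) (init : σ) :
    (PySem.List.pyRange 0 N).foldl
      (fun s i => (PySem.List.pyRange i N).foldl (fun s j => g s i j) s) init
      = (pvPairs N).foldl (fun s p => g s p.1 p.2) init := by
  simp only [pvPairs, List.foldl_flatMap, List.foldl_map]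

-- a joint two-accumulator nested loop is two nested loops
lemma pvJoint {σ₁ σ₂ : Type} (f : σ₁ → Int → Int → σ₁) (g : σ₂ → Int → Int → σ₂) (N : Int)
    (a : σ₁) (b : σ₂) :
    (PySem.List.pyRange 0 N).foldl
      (fun st i => (PySem.List.pyRange i N).foldl
        (fun (st : σ₁ × σ₂) j => (f st.1 i j, g st.2 i j)) st) (a, b)
    = ((PySem.List.pyRange 0 N).foldl
         (fun s i => (PySem.List.pyRange i N).foldl (fun s j => f s i j) s) a,
       (PySem.List.pyRange 0 N).foldl
         (fun s i => (PySem.List.pyRange i N).foldl (fun s j => g s i j) s) b) := by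
  have hinner : ∀ (st : σ₁ × σ₂) (i : Int),
      (PySem.List.pyRange i N).foldl (fun (st : σ₁ × σ₂) j => (f st.1 i j, g st.2 i j)) st
      = ((PySem.List.pyRange i N).foldl (fun s j => f s i j) st.1,
         (PySem.List.pyRange i N).foldl (fun s j => g s i j) st.2) := by
    intro st i
    obtain ⟨x, y⟩ := st
    exact PySem.List.foldl_prod_mk (fun s j => f s i j) (fun s j => g s i j) _ x y
  exact Eq.trans
    (PySem.List.foldl_congr_mem _ _ _ _ (fun st i _ => hinner st i))
    (PySem.List.foldl_prod_mk
      (fun s i => (PySem.List.pyRange i N).foldl (fun s j => f s i j) s)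
      (fun s i => (PySem.List.pyRange i N).foldl (fun s j => g s i j) s) _ a b)

lemma pvSubs_getD_fold (xs : List Int) (num : Int) :
    ∀ (ps : List (Int × Int)) (d : PySem.Dict Int Int),
    PySem.Dict.getD
      (ps.foldl (fun d p => PySem.Dict.modify d (pvDif xs p) 0 (fun old => max old (pvV xs p.2))) d)
      num 0
    = ps.foldl (fun acc p => if pvDif xs p = num then max acc (pvV xs p.2) else acc)
        (PySem.Dict.getD d num 0) := by
  intro ps
  induction ps with
  | nil => intro d; rfl
  | cons p t ih =>
    intro d
    simp only [List.foldl_cons]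
    rw [ih]
    congr 1
    rw [PySem.Dict.getD_modify]
    by_cases h : pvDif xs p = num
    · subst h; simp
    · rw [if_neg (fun hh => h hh.symm), if_neg h]

lemma pvSubs_getD (xs : List Int) (N : Int) (num : Int) :
    PySem.Dict.getD (pvSubs xs N) num 0
    = (pvPairs N).foldl (fun acc p => if pvDif xs p = num then max acc (pvV xs p.2) else acc) 0 := by
  unfold pvSubs
  rw [pvSubs_getD_fold]
  rfl

lemma pvSubs_contains (xs : List Int) (N : Int) (num : Int) :
    PySem.Dict.contains (pvSubs xs N) num = true ↔ ∃ p ∈ pvPairs N, pvDif xs p = num := by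
  rw [PySem.Dict.contains_eq_decide_mem_keys]
  unfold pvSubs
  rw [PySem.Dict.keys_foldl_modify_key (pvPairs N) (pvDif xs) 0
        (fun _ p => fun old => max old (pvV xs p.2)) PySem.Dict.empty]
  simp [PySem.Set.mem_update, eq_comm]

lemma pvMain (xs : List Int) (N : Int) :
    List.foldl (fun r num =>
        if PySem.Dict.contains (pvSubs xs N) num = true
        then max r (PySem.Dict.getD (pvSubs xs N) num 0) else r) 0 (pvAdds xs N)
    = (PySem.List.pyRange 0 N).foldl (fun best j =>
        if (PySem.List.pyRange 0 (j + 1)).any (fun i =>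
             PySem.Set.contains (pvAdds xs N) (pvV xs j - pvV xs i)) = true
        then max best (pvV xs j) else best) 0 := by
  apply le_antisymm
  · refine pvFold_le (fun num => PySem.Dict.contains (pvSubs xs N) num = true)
      (fun num => PySem.Dict.getD (pvSubs xs N) num 0) (pvAdds xs N) _ 0
      (pvFold_ge_init _ _ _ _) ?_
    intro num hmem _
    beta_reduce
    rw [pvSubs_getD]
    refine pvFold_le (fun p => pvDif xs p = num) (fun p => pvV xs p.2) (pvPairs N) _ 0
      (pvFold_ge_init _ _ _ _) ?_
    intro p hp hdif
    beta_reduce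
    obtain ⟨i, j⟩ := p
    have hij := (pvPairs_mem N i j).mp hp
    have hjmem : j ∈ PySem.List.pyRange 0 N :=
      PySem.List.mem_pyRange_one.mpr ⟨by omega, hij.2.2⟩
    have hcond : (PySem.List.pyRange 0 (j + 1)).any (fun i =>
        PySem.Set.contains (pvAdds xs N) (pvV xs j - pvV xs i)) = true := by
      rw [List.any_eq_true]
      refine ⟨i, PySem.List.mem_pyRange_one.mpr ⟨hij.1, by omega⟩, ?_⟩
      rw [PySem.Set.contains_iff]
      have hd : pvV xs j - pvV xs i = num := hdif
      rw [hd]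
      exact hmem
    exact pvFold_ge_elem _ _ _ 0 hjmem hcond
  · refine pvFold_le _ _ _ _ 0 (pvFold_ge_init _ _ _ _) ?_
    intro j hj hcond
    beta_reduce
    rw [List.any_eq_true] at hcond
    obtain ⟨i, hi, hcont⟩ := hcond
    rw [PySem.Set.contains_iff] at hcont
    have hi' := PySem.List.mem_pyRange_one.mp hi
    have hj' := PySem.List.mem_pyRange_one.mp hj
    have hpair : (i, j) ∈ pvPairs N := (pvPairs_mem N i j).mpr ⟨hi'.1, by omega, hj'.2⟩
    have hcontains : PySem.Dict.contains (pvSubs xs N) (pvV xs j - pvV xs i) = true :=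
      (pvSubs_contains xs N _).mpr ⟨(i, j), hpair, rfl⟩
    have h1 : pvV xs j ≤ PySem.Dict.getD (pvSubs xs N) (pvV xs j - pvV xs i) 0 := by
      rw [pvSubs_getD]
      exact pvFold_ge_elem (fun p => pvDif xs p = pvV xs j - pvV xs i)
        (fun p => pvV xs p.2) _ 0 hpair rfl
    have h2 : PySem.Dict.getD (pvSubs xs N) (pvV xs j - pvV xs i) 0 ≤
        List.foldl (fun r num =>
          if PySem.Dict.contains (pvSubs xs N) num = true
          then max r (PySem.Dict.getD (pvSubs xs N) num 0) else r) 0 (pvAdds xs N) :=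
      pvFold_ge_elem (fun num => PySem.Dict.contains (pvSubs xs N) num = true)
        (fun num => PySem.Dict.getD (pvSubs xs N) num 0) _ 0 hcont hcontains
    exact le_trans h1 h2

lemma solveA_canon (N : Int) (U : List Int) :
    solve N U = List.foldl (fun r num =>
      if PySem.Dict.contains (pvSubs (PySem.List.sorted U (fun x => x) false) N) num = true
      then max r (PySem.Dict.getD (pvSubs (PySem.List.sorted U (fun x => x) false) N) num 0) else r)
      0 (pvAdds (PySem.List.sorted U (fun x => x) false) N) := by
  simp only [solve]
  rw [pvJoint
      (fun s i j => PySem.Set.add s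
        (PySem.List.pyGetD (PySem.List.sorted U (fun x => x) false) i 0 + PySem.List.pyGetD (PySem.List.sorted U (fun x => x) false) j 0))
      (fun d i j => PySem.Dict.modify d
        (PySem.List.pyGetD (PySem.List.sorted U (fun x => x) false) j 0 - PySem.List.pyGetD (PySem.List.sorted U (fun x => x) false) i 0) 0
        (fun old => max old (PySem.List.pyGetD (PySem.List.sorted U (fun x => x) false) j 0)))]
  rw [pvNest, pvNest]
  rfl

lemma solveB_canon (N : Int) (U : List Int) :
    solve_alt N U = (PySem.List.pyRange 0 N).foldl (fun best j =>
      if (PySem.List.pyRange 0 (j + 1)).any (fun i =>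
           PySem.Set.contains (pvAdds (PySem.List.sorted U (fun x => x) false) N)
             (pvV (PySem.List.sorted U (fun x => x) false) j - pvV (PySem.List.sorted U (fun x => x) false) i)) = true
      then max best (pvV (PySem.List.sorted U (fun x => x) false) j) else best) 0 := by
  simp only [solve_alt]
  have hadds : (PySem.List.pyRange 0 N).foldl (fun s i =>
      (PySem.List.pyRange i N).foldl (fun s j =>
        PySem.Set.add s (PySem.List.pyGetD (PySem.List.sorted U (fun x => x) false) i 0 +
          PySem.List.pyGetD (PySem.List.sorted U (fun x => x) false) j 0)) s) PySem.Set.empty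
      = pvAdds (PySem.List.sorted U (fun x => x) false) N := by
    rw [pvNest]; rfl
  rw [hadds]
  refine PySem.List.foldl_congr_mem _ _ _ _ ?_
  intro best j _
  simp only [pvV]
  by_cases hc : (PySem.List.pyRange 0 (j + 1)).any (fun i =>
      PySem.Set.contains (pvAdds (PySem.List.sorted U (fun x => x) false) N)
        (PySem.List.pyGetD (PySem.List.sorted U (fun x => x) false) j 0 - PySem.List.pyGetD (PySem.List.sorted U (fun x => x) false) i 0)) = true
  · by_cases hlt : best < PySem.List.pyGetD (PySem.List.sorted U (fun x => x) false) j 0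
    · rw [if_pos ⟨hlt, hc⟩, if_pos hc, max_eq_right hlt.le]
    · rw [if_neg (fun h => hlt h.1), if_pos hc, max_eq_left (not_lt.mp hlt)]
  · rw [if_neg (fun h => hc h.2), if_neg hc]

-- ===== VERDICT (by name: the statement is the Claim_ definition above) =====
theorem solve_spec : Claim_equal_solve := by
  intro N U _ _
  unfold Spec_solve
  rw [solveA_canon, solveB_canon, pvMain]
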